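-- pv_equiv track=rewrite | github.com/tranthai2k2/newremove | 5_removetag_add_faceless_oldman.py | is_nsfw
-- ===== SOURCE A (Python) =====
-- from typing import List, Set, Callable, Optional
--
-- NSFW_KEYWORDS: Set[str] = {
--     "cum", "sex", "vaginal", "anal", "nude", "pussy", "penetration",
--     "breast", "nipples", "fingering", "fuck", "sperm", "intercourse",
--     "cervix", "creampie", "ejaculation", "rape", "clit", "clitoris",
--     "penis", "pussy juice", "orgasm", "doggystyle", "cowgirl",
--     "reverse cowgirl", "missionary", "spooning", "standing sex",
--     "prone bone", "pile driver", "mating press", "blowjob", "handjob",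
--     "titjob", "paizuri", "fellatio", "cunnilingus", "erection",
--     "testicles", "labia", "vulva", "anus", "masturbation",
--     "double penetration", "threesome", "gangbang", "bdsm", "bondage",
--     "grabbing", "groping", "bound", "restrained", "shibari", "rope",
--     "deepthroat", "irrumatio", "cumdrip", "cum overflow",
--     "internal cumshot", "pubic hair", "spread legs", "spread pussy",
--     "spread anus", "x-ray", "cross-section", "uterus", "cervix",
--     "deep penetration", "imminent penetration", "after sex", "after anal",
--     "after vaginal", "ejaculation", "saliva", "tongue out", "french kiss",
--     "licking", "hetero", "ass grab", "breast sucking"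
-- }
--
-- def is_nsfw(tags: Set[str]) -> bool:
--     """Check if tags contain NSFW content"""
--     # Keyword match
--     keyword_match = any(
--         any(k in t.lower() for k in NSFW_KEYWORDS) for t in tags
--     )
--     # Combo: 1boy + 1girl + grab/bound + nude/penis
--     combo_match = (
--         "1boy" in tags and "1girl" in tags and
--         any(x in tags for x in {"grabbing", "bound", "restrained", "groping"}) and
--         any(x in tags for x in {"nude", "penis", "pussy", "erection", "nipples"})
--     )
--     return keyword_match or combo_match
-- ===== SOURCE B (Python) =====
-- from typing import List, Set, Callable, Optional
--
-- NSFW_KEYWORDS: Set[str] = {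
--     "cum", "sex", "vaginal", "anal", "nude", "pussy", "penetration",
--     "breast", "nipples", "fingering", "fuck", "sperm", "intercourse",
--     "cervix", "creampie", "ejaculation", "rape", "clit", "clitoris",
--     "penis", "pussy juice", "orgasm", "doggystyle", "cowgirl",
--     "reverse cowgirl", "missionary", "spooning", "standing sex",
--     "prone bone", "pile driver", "mating press", "blowjob", "handjob",
--     "titjob", "paizuri", "fellatio", "cunnilingus", "erection",
--     "testicles", "labia", "vulva", "anus", "masturbation",
--     "double penetration", "threesome", "gangbang", "bdsm", "bondage",
--     "grabbing", "groping", "bound", "restrained", "shibari", "rope",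
--     "deepthroat", "irrumatio", "cumdrip", "cum overflow",
--     "internal cumshot", "pubic hair", "spread legs", "spread pussy",
--     "spread anus", "x-ray", "cross-section", "uterus", "cervix",
--     "deep penetration", "imminent penetration", "after sex", "after anal",
--     "after vaginal", "ejaculation", "saliva", "tongue out", "french kiss",
--     "licking", "hetero", "ass grab", "breast sucking"
-- }
--
-- # Multi-pattern index: keywords grouped by their first character, built once.
-- _BY_FIRST = {}
-- for _k in NSFW_KEYWORDS:
--     _BY_FIRST.setdefault(_k[0], []).append(_k)
--
--
-- def _tag_hit(low):
--     """Single left-to-right scan: at each position compare only the keywords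
--     that start with the character found there."""
--     for i in range(len(low)):
--         for k in _BY_FIRST.get(low[i], ()):
--             if low[i:i + len(k)] == k:
--                 return True
--     return False
--
--
-- def is_nsfw(tags: Set[str]) -> bool:
--     """Check if tags contain NSFW content"""
--     # The 1boy/1girl combo check of the original is redundant: every tag it
--     # requires ("grabbing", "bound", "restrained", "groping") is itself an
--     # NSFW keyword, so the keyword scan already fires on it.
--     return any(_tag_hit(t.lower()) for t in tags)
-- ===== Notes on version B (the rewrite author's own statement) =====
-- stated objective: alternative
-- what changed: Replaces the all-keywords-per-tag substring loop by a precomputed first-character index driving a single left-to-right position scan of each lowercased tag, and drops the 1boy/1girl combo branch after proving it redundant (every tag it requires is itself a keyword).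
import Mathlib
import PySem

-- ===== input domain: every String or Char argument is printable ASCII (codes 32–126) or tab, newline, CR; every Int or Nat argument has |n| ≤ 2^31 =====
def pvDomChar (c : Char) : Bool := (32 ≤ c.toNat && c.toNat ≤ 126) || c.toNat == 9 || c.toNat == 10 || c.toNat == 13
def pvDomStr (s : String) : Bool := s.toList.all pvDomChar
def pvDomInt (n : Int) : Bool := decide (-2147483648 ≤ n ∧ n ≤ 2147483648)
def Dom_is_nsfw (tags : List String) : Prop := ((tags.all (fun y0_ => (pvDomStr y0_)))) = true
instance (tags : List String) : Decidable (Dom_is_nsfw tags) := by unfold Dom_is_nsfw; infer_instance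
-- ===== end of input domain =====

set_option maxRecDepth 100000

-- B replaces the per-keyword substring loop by a single indexed position scan and drops
-- the combo branch (proved redundant); objective 'alternative'.


-- ===== PORT A =====
-- NSFW_KEYWORDS is a Python set literal: PySem.Set.ofList of the literals in source order
def nsfwKeywords : List String := PySem.Set.ofList
  [ "cum", "sex", "vaginal", "anal", "nude", "pussy", "penetration",
    "breast", "nipples", "fingering", "fuck", "sperm", "intercourse",
    "cervix", "creampie", "ejaculation", "rape", "clit", "clitoris",
    "penis", "pussy juice", "orgasm", "doggystyle", "cowgirl",
    "reverse cowgirl", "missionary", "spooning", "standing sex",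
    "prone bone", "pile driver", "mating press", "blowjob", "handjob",
    "titjob", "paizuri", "fellatio", "cunnilingus", "erection",
    "testicles", "labia", "vulva", "anus", "masturbation",
    "double penetration", "threesome", "gangbang", "bdsm", "bondage",
    "grabbing", "groping", "bound", "restrained", "shibari", "rope",
    "deepthroat", "irrumatio", "cumdrip", "cum overflow",
    "internal cumshot", "pubic hair", "spread legs", "spread pussy",
    "spread anus", "x-ray", "cross-section", "uterus", "cervix",
    "deep penetration", "imminent penetration", "after sex", "after anal",
    "after vaginal", "ejaculation", "saliva", "tongue out", "french kiss",
    "licking", "hetero", "ass grab", "breast sucking" ]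

def is_nsfw (tags : List String) : Bool :=
  let keyword_match :=
    tags.any fun t => nsfwKeywords.any fun k => PySem.Str.isIn k (PySem.Str.lower t)
  let combo_match :=
    tags.contains "1boy" && tags.contains "1girl" &&
    ((PySem.Set.ofList ["grabbing", "bound", "restrained", "groping"]).any fun x => tags.contains x) &&
    ((PySem.Set.ofList ["nude", "penis", "pussy", "erection", "nipples"]).any fun x => tags.contains x)
  keyword_match || combo_match

-- ===== PORT B =====
-- k[0] (all keywords are nonempty literals, so the default is never used)
def fcB (k : String) : Char := k.toList.headD ' '

-- _BY_FIRST: keywords grouped by first character (setdefault(c, []).append(k))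
def byFirst : PySem.Dict Char (List String) :=
  nsfwKeywords.foldl (fun d k => d.insert (fcB k) (d.getD (fcB k) [] ++ [k])) PySem.Dict.empty

-- _tag_hit(low): scan each position, compare only the keywords starting with low[i]
def tagHit (low : List Char) : Bool :=
  (List.range low.length).any fun i =>
    (byFirst.getD (low.getD i ' ') []).any fun k =>
      PySem.List.slice low (some (i : Int)) (some ((i : Int) + (k.toList.length : Int))) == k.toList

def is_nsfw_alt (tags : List String) : Bool :=
  tags.any fun t => tagHit (PySem.Str.lower t).toList

-- ===== PRECONDITION & SPEC =====
def Spec_is_nsfw (tags : List String) (out : Bool) : Prop := out = is_nsfw_alt tags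
instance (tags : List String) (out : Bool) : Decidable (Spec_is_nsfw tags out) := by unfold Spec_is_nsfw; infer_instance

-- ===== CLAIM (what is proved, stated in full; the proofs are below) =====
def Claim_equal_is_nsfw : Prop := ∀ (tags : List String), Dom_is_nsfw tags → Spec_is_nsfw tags (is_nsfw tags)

-- ===== LEMMAS AND PROOFS =====

lemma group_getD (ks : List String) (d : PySem.Dict Char (List String)) (c : Char) :
    (ks.foldl (fun d k => d.insert (fcB k) (d.getD (fcB k) [] ++ [k])) d).getD c []
      = d.getD c [] ++ ks.filter (fun k => fcB k == c) := by
  induction ks generalizing d with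
  | nil => simp
  | cons k ks ih =>
    simp only [List.foldl_cons, List.filter_cons, ih]
    rw [PySem.Dict.getD_insert]
    by_cases h : fcB k = c
    · simp [h]
    · have h' : (fcB k == c) = false := by simp [h]
      rw [if_neg (fun hc => h hc.symm)]
      simp [h']

lemma byFirst_getD (c : Char) :
    byFirst.getD c [] = nsfwKeywords.filter (fun k => fcB k == c) := by
  have h := group_getD nsfwKeywords PySem.Dict.empty c
  rw [PySem.Dict.getD_empty] at h
  simpa [byFirst] using h

lemma kw_nonempty : ∀ k ∈ nsfwKeywords, k.toList ≠ [] := by decide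

-- the per-string equivalence: B's indexed position scan = A's per-keyword substring test
lemma scan_eq (l : List Char) :
    tagHit l = nsfwKeywords.any fun k => PySem.Chars.isIn k.toList l := by
  rw [Bool.eq_iff_iff]
  simp only [tagHit, List.any_eq_true, List.mem_range, byFirst_getD, List.mem_filter,
    PySem.List.slice_natCast_add, beq_iff_eq]
  constructor
  · rintro ⟨i, hi, k, ⟨hk, -⟩, htake⟩
    refine ⟨k, hk, ?_⟩
    rw [← PySem.Chars.exists_prefix_drop_iff_isIn]
    exact ⟨i, List.prefix_iff_eq_take.2 htake.symm⟩
  · rintro ⟨k, hk, hin⟩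
    obtain ⟨j, hpre⟩ := (PySem.Chars.exists_prefix_drop_iff_isIn _ _).2 hin
    obtain ⟨h, rest, hk0⟩ : ∃ h rest, k.toList = h :: rest := by
      cases hkl : k.toList with
      | nil => exact absurd hkl (kw_nonempty k hk)
      | cons h rest => exact ⟨h, rest, rfl⟩
    have hj : j < l.length := by
      by_contra hle
      have hnil : l.drop j = [] := List.drop_eq_nil_of_le (by omega)
      rw [hnil, List.prefix_nil, hk0] at hpre
      simp at hpre
    have hdrop : l.drop j = l[j] :: l.drop (j + 1) := List.drop_eq_getElem_cons hj
    have hhead : l[j] = h := by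
      rw [hk0, hdrop] at hpre
      exact ((List.cons_prefix_cons.1 hpre).1).symm
    refine ⟨j, hj, k, ⟨hk, ?_⟩, ?_⟩
    · simp [fcB, hk0, List.getD, List.getElem?_eq_getElem hj, hhead]
    · exact (List.prefix_iff_eq_take.1 hpre).symm

-- the combo branch is redundant: each tag it requires is itself a keyword
lemma combo_kw : ∀ x ∈ (["grabbing", "bound", "restrained", "groping"] : List String),
    (nsfwKeywords.any fun k => PySem.Str.isIn k (PySem.Str.lower x)) = true := by decide

-- ===== VERDICT (by name: the statement is the Claim_ definition above) =====
theorem is_nsfw_spec : Claim_equal_is_nsfw := by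
  intro tags _
  simp only [Spec_is_nsfw, is_nsfw, is_nsfw_alt]
  have hfun : ∀ t : String, tagHit (PySem.Str.lower t).toList
      = nsfwKeywords.any fun k => PySem.Str.isIn k (PySem.Str.lower t) := by
    intro t
    rw [scan_eq]
    simp [pysem]
  simp only [hfun]
  cases hkwm : tags.any fun t => nsfwKeywords.any fun k => PySem.Str.isIn k (PySem.Str.lower t) with
  | true => rw [Bool.true_or]
  | false =>
    rw [Bool.false_or]
    have hC : ((PySem.Set.ofList ["grabbing", "bound", "restrained", "groping"]).any fun x => tags.contains x) = false := by
      rw [List.any_eq_false]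
      intro x hx
      have hx4 : x ∈ (["grabbing", "bound", "restrained", "groping"] : List String) :=
        (PySem.Set.mem_ofList _ _).1 hx
      intro hcon
      have hxtag : x ∈ tags := by simpa using hcon
      have hfalse := List.any_eq_false.1 hkwm x hxtag
      exact hfalse (combo_kw x hx4)
    rw [hC]
    simp
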